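-- pv_equiv track=rewrite | github.com/ChiCoTheLaAnh/fpl-transfer-suggester | data_pipeline/ingest.py | get_current_event_id
-- ===== SOURCE A (Python) =====
-- from typing import Any, Dict, List, Optional, Tuple
--
-- def parse_int(value: Any) -> int:
--     try:
--         return int(value)
--     except (TypeError, ValueError):
--         return 0
--
-- def get_current_event_id(events: List[Dict[str, Any]]) -> int:
--     for event in events:
--         if event.get("is_current"):
--             return parse_int(event.get("id"))
--     for event in events:
--         if event.get("is_next"):
--             return parse_int(event.get("id"))
--     ids = [parse_int(event.get("id")) for event in events if parse_int(event.get("id")) > 0]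
--     return max(ids) if ids else 0
-- ===== SOURCE B (Python) =====
-- from typing import Any
--
-- def parse_int(value: Any) -> int:
--     try:
--         return int(value)
--     except (TypeError, ValueError):
--         return 0
--
-- def get_current_event_id(events):
--     cur = nxt = mx = None
--     for event in events:
--         if cur is None and event.get("is_current"):
--             cur = parse_int(event.get("id"))
--         if nxt is None and event.get("is_next"):
--             nxt = parse_int(event.get("id"))
--         v = parse_int(event.get("id"))
--         if v > 0 and (mx is None or mx < v):
--             mx = v
--     if cur is not None:
--         return cur
--     if nxt is not None:
--         return nxt
--     return mx if mx is not None else 0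
-- ===== Notes on version B (the rewrite author's own statement) =====
-- stated objective: alternative
-- what changed: Replaces A's three sequential passes (current scan, next scan, positive-id comprehension plus max) with a single loop that records the first current id, the first next id and the running maximum positive id, choosing among them afterwards.
import Mathlib
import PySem

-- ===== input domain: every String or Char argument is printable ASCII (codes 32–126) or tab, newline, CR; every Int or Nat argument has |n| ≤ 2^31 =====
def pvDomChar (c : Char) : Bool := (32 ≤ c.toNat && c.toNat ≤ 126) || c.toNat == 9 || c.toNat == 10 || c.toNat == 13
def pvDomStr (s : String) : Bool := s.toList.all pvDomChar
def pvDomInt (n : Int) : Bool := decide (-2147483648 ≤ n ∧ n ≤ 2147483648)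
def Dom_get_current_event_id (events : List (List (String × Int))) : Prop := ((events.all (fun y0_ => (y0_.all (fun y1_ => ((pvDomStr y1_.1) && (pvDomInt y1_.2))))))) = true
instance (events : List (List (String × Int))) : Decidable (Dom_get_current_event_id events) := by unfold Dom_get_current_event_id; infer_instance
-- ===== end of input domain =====

-- B replaces A's three sequential passes by one loop carrying three accumulators; return value only, no mutation.

-- ===== PORT A =====
-- event.get(k): first-match lookup in the association list (Python dict has unique keys)
def pvGet (e : List (String × Int)) (k : String) : Option Int := List.lookup k e

-- truthiness of event.get(k): missing key or 0 is falsy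
def pvTruthy (o : Option Int) : Bool := match o with | some v => v != 0 | none => false

-- parse_int(event.get("id")): an int parses to itself, None (missing key) → TypeError → 0
def pvParse (o : Option Int) : Int := match o with | some v => v | none => 0

-- first loop of A: first event with truthy "is_current"
def pvLoopCur : List (List (String × Int)) → Option Int
  | [] => none
  | e :: rest =>
    if pvTruthy (pvGet e "is_current") then some (pvParse (pvGet e "id")) else pvLoopCur rest

-- second loop of A: first event with truthy "is_next"
def pvLoopNext : List (List (String × Int)) → Option Int
  | [] => none
  | e :: rest =>
    if pvTruthy (pvGet e "is_next") then some (pvParse (pvGet e "id")) else pvLoopNext rest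

def get_current_event_id (events : List (List (String × Int))) : Int :=
  match pvLoopCur events with
  | some v => v
  | none =>
    match pvLoopNext events with
    | some v => v
    | none =>
      let ids := (events.filter (fun e => decide (0 < pvParse (pvGet e "id")))).map
                   (fun e => pvParse (pvGet e "id"))
      match PySem.List.max? ids (fun y => y) with   -- max(ids) if ids else 0
      | some m => m
      | none => 0

-- ===== PORT B =====
-- single pass: first current id, first next id, running max of positive ids
def pvScan : List (List (String × Int)) → Option Int → Option Int → Option Int →
    Option Int × Option Int × Option Int
  | [], c, n, m => (c, n, m)
  | e :: rest, c, n, m =>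
    let c' := if c.isNone && pvTruthy (pvGet e "is_current") then some (pvParse (pvGet e "id")) else c
    let n' := if n.isNone && pvTruthy (pvGet e "is_next") then some (pvParse (pvGet e "id")) else n
    let v := pvParse (pvGet e "id")
    let m' := if 0 < v && (match m with | none => true | some mv => decide (mv < v)) then some v else m
    pvScan rest c' n' m'

def get_current_event_id_alt (events : List (List (String × Int))) : Int :=
  let (c, n, m) := pvScan events none none none
  match c with
  | some v => v
  | none =>
    match n with
    | some v => v
    | none => m.getD 0

-- ===== PRECONDITION & SPEC =====
def Spec_get_current_event_id (events : List (List (String × Int))) (out : Int) : Prop := out = get_current_event_id_alt events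
instance (events : List (List (String × Int))) (out : Int) : Decidable (Spec_get_current_event_id events out) := by unfold Spec_get_current_event_id; infer_instance

-- ===== CLAIM (what is proved, stated in full; the proofs are below) =====
def Claim_equal_get_current_event_id : Prop := ∀ (events : List (List (String × Int))), Dom_get_current_event_id events → Spec_get_current_event_id events (get_current_event_id events)

-- ===== LEMMAS AND PROOFS =====

-- the running-max accumulator as a standalone fold (the third component of pvScan)
def pvMaxAcc : List (List (String × Int)) → Option Int → Option Int
  | [], m => m
  | e :: rest, m =>
    let v := pvParse (pvGet e "id")
    pvMaxAcc rest (if 0 < v && (match m with | none => true | some mv => decide (mv < v)) then some v else m)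

lemma pvScan_eq (l : List (List (String × Int))) : ∀ c n m,
    pvScan l c n m =
      ((match c with | some v => some v | none => pvLoopCur l),
       (match n with | some v => some v | none => pvLoopNext l),
       pvMaxAcc l m) := by
  induction l with
  | nil => intro c n m; simp [pvScan, pvLoopCur, pvLoopNext, pvMaxAcc]; cases c <;> cases n <;> simp
  | cons e rest ih =>
    intro c n m
    simp only [pvScan, pvMaxAcc, ih, pvLoopCur, pvLoopNext]
    cases c <;> cases n <;> simp [Option.isNone] <;> split_ifs <;> simp_all

-- the running max equals max of the accumulator and the positive ids
lemma pvMaxAcc_spec (l : List (List (String × Int))) : ∀ m,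
    pvMaxAcc l m =
      ((l.filter (fun e => decide (0 < pvParse (pvGet e "id")))).map
          (fun e => pvParse (pvGet e "id"))).foldl
        (fun acc v => match acc with | none => some v | some a => some (max a v)) m := by
  induction l with
  | nil => intro m; simp [pvMaxAcc]
  | cons e rest ih =>
    intro m
    rcases m with _ | a
    · by_cases hv : 0 < pvParse (pvGet e "id") <;>
        simp [pvMaxAcc, hv, ih]
    · by_cases hv : 0 < pvParse (pvGet e "id")
      · by_cases h : a < pvParse (pvGet e "id")
        · have hm : max a (pvParse (pvGet e "id")) = pvParse (pvGet e "id") := by omega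
          simp [pvMaxAcc, hv, h, ih, hm]
        · have hm : max a (pvParse (pvGet e "id")) = a := by omega
          simp [pvMaxAcc, hv, h, ih, hm]
      · simp [pvMaxAcc, hv, ih]

-- Option-max fold over a list equals Python's max (or 0 when empty)
lemma maxfold_eq_max? (ids : List Int) :
    (ids.foldl (fun acc v => match acc with | none => some v | some a => some (max a v))
        (none : Option Int)).getD 0 =
      (match PySem.List.max? ids (fun y => y) with | some m => m | none => 0) := by
  cases ids with
  | nil => simp [PySem.List.max?]
  | cons x t =>
    rw [PySem.List.max?_id_cons]
    simp only [List.foldl_cons]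
    have : ∀ (t : List Int) (a : Int),
        (t.foldl (fun acc v => match acc with | none => some v | some a => some (max a v))
          (some a)).getD 0 = t.foldl max a := by
      intro t
      induction t with
      | nil => intro a; simp
      | cons y s ih => intro a; simp [ih]
    simp [this]

-- ===== VERDICT (by name: the statement is the Claim_ definition above) =====
theorem get_current_event_id_spec : Claim_equal_get_current_event_id := by
  intro events _
  show get_current_event_id events = get_current_event_id_alt events
  unfold get_current_event_id get_current_event_id_alt
  rw [pvScan_eq]
  simp only []
  cases hc : pvLoopCur events with
  | some v => simp
  | none =>
    cases hn : pvLoopNext events with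
    | some v => simp
    | none =>
      simp only []
      rw [pvMaxAcc_spec, maxfold_eq_max?]
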